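-- pv_equiv track=rewrite | github.com/nalua72/family-tree | app/services/relationships_service.py | summarize_movements
-- ===== SOURCE A (Python) =====
-- def summarize_movements(movements: list[int]) -> dict[str, int]:
--     n_up = 0
--     n_down = 0
--
--     for movement in movements:
--         if movement == 1:
--             n_up += 1
--         else:
--             n_down += 1
--
--     summary = {"n_up": n_up, "n_down": n_down}
--
--     return summary
-- ===== SOURCE B (Python) =====
-- def summarize_movements(movements: list[int]) -> dict[str, int]:
--     # divide and conquer: count ups in movements[lo:hi] by splitting the range
--     def ups(lo: int, hi: int) -> int:
--         if hi - lo == 0: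
--             return 0
--         if hi - lo == 1:
--             return 1 if movements[lo] == 1 else 0
--         mid = (lo + hi) // 2
--         return ups(lo, mid) + ups(mid, hi)
--
--     n_up = ups(0, len(movements))
--     return {"n_up": n_up, "n_down": len(movements) - n_up}
-- ===== Notes on version B (the rewrite author's own statement) =====
-- stated objective: alternative
-- what changed: B counts the ups by a divide-and-conquer recursion that splits the index range in halves and sums the two halves' counts, then derives n_down arithmetically as len - n_up; A is a single linear loop incrementing two counters.
import Mathlib
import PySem

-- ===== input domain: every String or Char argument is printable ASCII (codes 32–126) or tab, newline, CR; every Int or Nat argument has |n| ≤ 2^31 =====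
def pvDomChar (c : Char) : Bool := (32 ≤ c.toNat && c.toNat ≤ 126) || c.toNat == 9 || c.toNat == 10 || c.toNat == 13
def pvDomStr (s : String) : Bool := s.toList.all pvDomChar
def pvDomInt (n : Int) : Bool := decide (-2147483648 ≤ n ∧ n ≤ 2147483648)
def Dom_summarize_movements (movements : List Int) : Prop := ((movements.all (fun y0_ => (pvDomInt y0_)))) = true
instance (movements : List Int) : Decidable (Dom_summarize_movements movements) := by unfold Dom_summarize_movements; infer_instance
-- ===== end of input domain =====

-- B counts the ups by divide-and-conquer on the index range and derives n_down = len - n_up;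
-- return-value equivalence with A's linear two-counter loop.

-- ===== PORT A =====
def summarize_movements (movements : List Int) : List (String × Int) :=
  let p := movements.foldl (fun (s : Int × Int) movement =>
    if movement == 1 then (s.1 + 1, s.2) else (s.1, s.2 + 1)) (0, 0)
  [("n_up", p.1), ("n_down", p.2)]

-- ===== PORT B =====
-- helper `ups(lo, hi)` from Source B: divide-and-conquer count of 1s in movements[lo:hi].
-- movements[lo] is always in range at the call sites (0 ≤ lo < hi ≤ len), so getD lo 0 is exact.
def pvUps (movements : List Int) (lo hi : Nat) : Int :=
  if hi - lo = 0 then 0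
  else if hi - lo = 1 then (if movements.getD lo 0 == 1 then 1 else 0)
  else
    pvUps movements lo ((lo + hi) / 2) + pvUps movements ((lo + hi) / 2) hi
termination_by hi - lo
decreasing_by all_goals omega

def summarize_movements_alt (movements : List Int) : List (String × Int) :=
  let n_up := pvUps movements 0 movements.length
  [("n_up", n_up), ("n_down", (movements.length : Int) - n_up)]

-- ===== PRECONDITION & SPEC =====
def Spec_summarize_movements (movements : List Int) (out : List (String × Int)) : Prop := out = summarize_movements_alt movements
instance (movements : List Int) (out : List (String × Int)) : Decidable (Spec_summarize_movements movements out) := by unfold Spec_summarize_movements; infer_instance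

-- ===== CLAIM (what is proved, stated in full; the proofs are below) =====
def Claim_equal_summarize_movements : Prop := ∀ (movements : List Int), Dom_summarize_movements movements → Spec_summarize_movements movements (summarize_movements movements)

-- ===== LEMMAS AND PROOFS =====

-- A's loop accumulates (count of 1s, count of the rest).
lemma fold_counts (movements : List Int) (a b : Int) :
    movements.foldl (fun (s : Int × Int) movement =>
      if movement == 1 then (s.1 + 1, s.2) else (s.1, s.2 + 1)) (a, b)
    = (a + movements.count 1, b + ((movements.length : Int) - movements.count 1)) := by
  induction movements generalizing a b with
  | nil => simp
  | cons x xs ih =>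
    simp only [List.foldl_cons, beq_iff_eq] at ih ⊢
    by_cases h : x = 1
    · rw [if_pos h, ih, h, List.count_cons_self]
      refine Prod.ext ?_ ?_ <;> simp <;> push_cast <;> ring
    · rw [if_neg h, ih, List.count_cons_of_ne h]
      refine Prod.ext ?_ ?_ <;> simp <;> push_cast <;> ring

-- B's divide-and-conquer counts the 1s of the slice movements[lo:hi].
lemma pvUps_eq (movements : List Int) (lo hi : Nat)
    (hhi : hi ≤ movements.length) (hlo : lo ≤ hi) :
    pvUps movements lo hi = (((movements.drop lo).take (hi - lo)).count 1 : Int) := by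
  induction lo, hi using pvUps.induct movements with
  | case1 lo hi h =>
    rw [pvUps]
    simp [h]
  | case2 lo hi h0 h1 hv =>
    rw [pvUps]
    have hlt : lo < movements.length := by omega
    rw [if_neg h0, if_pos h1, if_pos hv, h1]
    rw [List.drop_eq_getElem_cons hlt]
    have hv' : movements[lo] = 1 := by
      have := List.getD_eq_getElem movements 0 hlt
      rw [this] at hv; exact beq_iff_eq.mp hv
    simp [hv']
  | case3 lo hi h0 h1 hv =>
    rw [pvUps]
    have hlt : lo < movements.length := by omega
    rw [if_neg h0, if_pos h1, if_neg hv, h1]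
    rw [List.drop_eq_getElem_cons hlt]
    have hv' : movements[lo] ≠ 1 := by
      have := List.getD_eq_getElem movements 0 hlt
      rw [this] at hv; simpa using hv
    have h1el : List.take 1 (movements[lo] :: List.drop (lo + 1) movements) = [movements[lo]] := rfl
    rw [h1el]
    have hc : List.count 1 [movements[lo]] = 0 := by simp [List.count_cons, hv']
    rw [hc]
    simp
  | case4 lo hi h0 h1 ih1 ih2 =>
    rw [pvUps]
    rw [if_neg h0, if_neg h1]
    rw [ih1 (by omega) (by omega), ih2 hhi (by omega)]
    have hd : List.drop ((lo + hi) / 2 - lo) (List.drop lo movements)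
        = List.drop ((lo + hi) / 2) movements := by
      rw [List.drop_drop]; congr 1; omega
    have h : hi - lo = ((lo + hi) / 2 - lo) + (hi - (lo + hi) / 2) := by omega
    rw [h, List.take_add, hd, List.count_append]
    push_cast
    ring

-- ===== VERDICT (by name: the statement is the Claim_ definition above) =====
theorem summarize_movements_spec : Claim_equal_summarize_movements := by
  intro movements _
  unfold Spec_summarize_movements summarize_movements summarize_movements_alt
  rw [fold_counts, pvUps_eq movements 0 movements.length le_rfl (Nat.zero_le _)]
  simp
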